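-- pv_equiv track=rewrite | github.com/bdigafe/cs598_dlh_final | behrt/commons/utils.py | index_seg
-- ===== SOURCE A (Python) =====
-- def index_seg(seq_tokens, symbol='SEP'):
--     """
--         The segment index is used to differentiate two consecutive visits.
--         The value of the segment is 0 or 1 alternating for each sentence: [0, 1, 0, 1, 0, 1]
--         Tokens are separated by the symbol will be assigned the same segment index.
--
--         Example:
--             Data:   [v1[D1], v2[D1,D2], v3[D1,D2,D3]]
--
--                     ----V1----  ----V2------  -----V3------------
--             tokens: [D1,        SEP, D1, D2,  SEP, D1, D2, D3 SEP]
--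
--                     ----V1----  ----V2------  -----V3-------------
--             seg:    [0,   0,    1,   1,  1,   1,   0,  0,  0, 0]
--
--         Parameters:
--             tokens: list = list of tokens
--             symbol: str = symbol to segment the tokens
--
--         returns: seg = list of segment indexes
--     """
--     flag = 0
--     seg = []
--
--     for token in seq_tokens:
--         if token == symbol:
--             seg.append(flag)
--             if flag == 0:
--                 flag = 1
--             else:
--                 flag = 0
--         else:
--             seg.append(flag)
--
--     return seg
-- ===== SOURCE B (Python) =====
-- def index_seg(seq_tokens, symbol='SEP'):
--     # Table-then-map: flags, exclusive prefix sums, then parity.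
--     flags = [1 if t == symbol else 0 for t in seq_tokens]
--     pref = [0]
--     s = 0
--     for f in flags:
--         s += f
--         pref.append(s)
--     return [p % 2 for p in pref[:-1]]
-- ===== Notes on version B (the rewrite author's own statement) =====
-- stated objective: alternative
-- what changed: Replaces A's single stateful toggle loop with a table-then-map pipeline: a flags list, an exclusive prefix-sum table, and a final parity map.
import Mathlib
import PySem

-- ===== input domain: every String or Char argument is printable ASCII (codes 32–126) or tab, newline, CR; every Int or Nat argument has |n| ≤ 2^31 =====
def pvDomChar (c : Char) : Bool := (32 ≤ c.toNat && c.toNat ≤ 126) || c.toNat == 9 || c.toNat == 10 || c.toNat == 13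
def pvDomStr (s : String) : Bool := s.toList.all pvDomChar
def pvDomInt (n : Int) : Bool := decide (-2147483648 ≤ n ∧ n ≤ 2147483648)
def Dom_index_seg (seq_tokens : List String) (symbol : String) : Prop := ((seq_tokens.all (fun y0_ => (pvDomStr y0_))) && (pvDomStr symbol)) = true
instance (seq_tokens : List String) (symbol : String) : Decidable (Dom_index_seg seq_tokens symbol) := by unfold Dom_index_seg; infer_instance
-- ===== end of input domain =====

-- B replaces A's stateful toggle loop by a flags/prefix-sum/parity pipeline (alternative decomposition, same cost).

-- ===== PORT A =====
-- A's loop over tokens with state (flag, seg); append flag, toggle on the symbol.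
def index_seg (seq_tokens : List String) (symbol : String) : List Int :=
  (seq_tokens.foldl
    (fun (st : Int × List Int) token =>
      if token == symbol then
        let seg := st.2 ++ [st.1]
        let flag := if st.1 == 0 then (1 : Int) else 0
        (flag, seg)
      else
        (st.1, st.2 ++ [st.1]))
    (0, [])).2

-- ===== PORT B =====
-- B: flags list, then exclusive prefix-sum table pref (running sum s), then map parity over pref[:-1].
def index_seg_alt (seq_tokens : List String) (symbol : String) : List Int :=
  let flags := seq_tokens.map (fun t => if t == symbol then (1 : Int) else 0)
  let st := flags.foldl (fun (st : List Int × Int) f => (st.1 ++ [st.2 + f], st.2 + f)) ([0], 0)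
  (st.1.dropLast).map (fun p => PySem.Int.mod p 2)

-- ===== PRECONDITION & SPEC =====
def Spec_index_seg (seq_tokens : List String) (symbol : String) (out : List Int) : Prop := out = index_seg_alt seq_tokens symbol
instance (seq_tokens : List String) (symbol : String) (out : List Int) : Decidable (Spec_index_seg seq_tokens symbol out) := by unfold Spec_index_seg; infer_instance

-- ===== CLAIM (what is proved, stated in full; the proofs are below) =====
def Claim_equal_index_seg : Prop := ∀ (seq_tokens : List String) (symbol : String), Dom_index_seg seq_tokens symbol → Spec_index_seg seq_tokens symbol (index_seg seq_tokens symbol)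

-- ===== LEMMAS AND PROOFS =====

-- reference sequence: the parity mod 2 of the count s of symbols seen so far, per token
def pvCore (l : List String) (symbol : String) (s : Int) : List Int :=
  match l with
  | [] => []
  | t :: r => PySem.Int.mod s 2 :: pvCore r symbol (s + (if t == symbol then 1 else 0))

theorem pvMod2 (a : Int) : PySem.Int.mod a 2 = a % 2 :=
  PySem.Int.mod_eq_emod_of_pos (by norm_num)

theorem pvA_eq_core (l : List String) (symbol : String) :
    ∀ (s : Int) (acc : List Int),
    (l.foldl
      (fun (st : Int × List Int) token =>
        if token == symbol then
          let seg := st.2 ++ [st.1]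
          let flag := if st.1 == 0 then (1 : Int) else 0
          (flag, seg)
        else
          (st.1, st.2 ++ [st.1]))
      (PySem.Int.mod s 2, acc)).2 = acc ++ pvCore l symbol s := by
  induction l with
  | nil => intro s acc; simp [pvCore]
  | cons t r ih =>
    intro s acc
    by_cases h : (t == symbol) = true
    · have h1 : (if PySem.Int.mod s 2 == 0 then (1 : Int) else 0) = PySem.Int.mod (s + 1) 2 := by
        simp only [pvMod2, beq_iff_eq]
        split_ifs with h2 <;> omega
      simp only [List.foldl_cons, pvCore, h, if_pos]
      rw [h1, ih (s + 1) (acc ++ [PySem.Int.mod s 2])]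
      simp
    · have hb : (t == symbol) = false := by simpa using h
      simp only [List.foldl_cons, pvCore, hb, Bool.false_eq_true, if_false, add_zero]
      rw [ih s (acc ++ [PySem.Int.mod s 2])]
      simp

theorem pvB_pref (l : List String) (symbol : String) :
    ∀ (s : Int) (pref : List Int),
    ((l.map (fun t => if t == symbol then (1 : Int) else 0)).foldl
      (fun (st : List Int × Int) f => (st.1 ++ [st.2 + f], st.2 + f)) (pref ++ [s], s)).1
    = pref ++ [s] ++
      ((l.map (fun t => if t == symbol then (1 : Int) else 0)).foldl
        (fun (st : List Int × Int) f => (st.1 ++ [st.2 + f], st.2 + f)) ([], s)).1 := by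
  induction l with
  | nil => intro s pref; simp
  | cons t r ih =>
    intro s pref
    simp only [List.map_cons, List.foldl_cons, List.nil_append]
    rw [ih _ (pref ++ [s])]
    have h2 := ih (s + (if (t == symbol) then (1:Int) else 0)) ([] : List Int)
    simp only [List.nil_append] at h2
    rw [h2]
    simp

theorem pvB_eq_core (l : List String) (symbol : String) :
    ∀ (s : Int),
    (((l.map (fun t => if t == symbol then (1 : Int) else 0)).foldl
      (fun (st : List Int × Int) f => (st.1 ++ [st.2 + f], st.2 + f)) ([s], s)).1.dropLast).map
      (fun p => PySem.Int.mod p 2) = pvCore l symbol s := by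
  induction l with
  | nil => intro s; simp [pvCore]
  | cons t r ih =>
    intro s
    simp only [List.map_cons, List.foldl_cons, pvCore, List.singleton_append]
    have hp := pvB_pref r symbol (s + (if (t == symbol) then (1:Int) else 0)) [s]
    simp only [List.cons_append, List.nil_append] at hp
    rw [hp]
    have h2 := pvB_pref r symbol (s + (if (t == symbol) then (1:Int) else 0)) ([] : List Int)
    simp only [List.nil_append] at h2
    have h3 := ih (s + (if (t == symbol) then (1:Int) else 0))
    rw [h2] at h3
    simp only [List.singleton_append] at h3
    rw [show (s :: (s + (if (t == symbol) then (1:Int) else 0)) ::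
        ((r.map (fun t => if t == symbol then (1 : Int) else 0)).foldl
          (fun (st : List Int × Int) f => (st.1 ++ [st.2 + f], st.2 + f))
          ([], s + (if (t == symbol) then (1:Int) else 0))).1).dropLast
      = s :: ((s + (if (t == symbol) then (1:Int) else 0)) ::
        ((r.map (fun t => if t == symbol then (1 : Int) else 0)).foldl
          (fun (st : List Int × Int) f => (st.1 ++ [st.2 + f], st.2 + f))
          ([], s + (if (t == symbol) then (1:Int) else 0))).1).dropLast from by simp]
    simp only [List.map_cons]
    rw [h3]

-- ===== VERDICT (by name: the statement is the Claim_ definition above) =====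
theorem index_seg_spec : Claim_equal_index_seg := by
  intro seq_tokens symbol _
  unfold Spec_index_seg index_seg index_seg_alt
  have hA := pvA_eq_core seq_tokens symbol 0 []
  have h0 : PySem.Int.mod (0 : Int) 2 = 0 := by rw [pvMod2]; simp
  rw [h0] at hA
  rw [hA]
  simpa using (pvB_eq_core seq_tokens symbol 0).symm
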